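-- pv_equiv track=rewrite | github.com/USFDataVisualization/TopoLines | old_java/usf/dvl/signal/filters/lowpass.py | bandPass_Filter
-- ===== SOURCE A (Python) =====
-- def bandPass_Filter(t,x1,x2):
--     temp = []
--     for count, value in enumerate(t):
--         if count == 0:
--             temp.append(value)
--             continue
--
--         if( count > x1 and count < x2 ):
--             temp.append(value)
--
--         #elif( value < x1 and value > x2 ):
--         #    temp.append(value)
--
--         else:
--             temp.append(0)
--
--     return temp
-- ===== SOURCE B (Python) =====
-- def bandPass_Filter(t, x1, x2):
--     res = [0] * len(t)
--     if t:
--         res[0] = t[0]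
--     lo = max(1, x1 + 1)
--     hi = min(len(t), x2)
--     if lo < hi:
--         res[lo:hi] = t[lo:hi]
--     return res
-- ===== Notes on version B (the rewrite author's own statement) =====
-- stated objective: simpler
-- what changed: B pre-fills the whole output with zeros, sets index 0 from t, and overwrites only the clamped kept band with a slice copy, instead of A's per-element enumerate-and-branch loop that appends to an accumulator.
import Mathlib
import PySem

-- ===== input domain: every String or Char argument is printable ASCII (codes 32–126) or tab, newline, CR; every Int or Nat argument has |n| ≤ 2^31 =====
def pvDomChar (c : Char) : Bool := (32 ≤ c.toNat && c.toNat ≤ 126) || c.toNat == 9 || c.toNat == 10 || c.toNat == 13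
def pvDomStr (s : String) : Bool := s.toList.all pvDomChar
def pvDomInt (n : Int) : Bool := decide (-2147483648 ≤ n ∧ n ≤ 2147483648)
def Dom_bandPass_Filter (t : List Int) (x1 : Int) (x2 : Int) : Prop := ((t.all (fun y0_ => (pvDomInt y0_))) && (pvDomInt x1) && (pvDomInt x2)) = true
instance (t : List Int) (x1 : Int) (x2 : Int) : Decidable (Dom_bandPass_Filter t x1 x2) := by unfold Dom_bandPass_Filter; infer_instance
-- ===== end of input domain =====

-- B pre-fills the output with zeros and overwrites only the kept entries (index 0 and the clamped
-- band slice) instead of A's scan-every-element-and-branch loop; objective: simpler decomposition.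

-- ===== PORT A =====
def bandPass_Filter (t : List Int) (x1 : Int) (x2 : Int) : List Int :=
  (PySem.List.enumerate t 0).foldl
    (fun temp cv =>
      if cv.1 = 0 then temp ++ [cv.2]
      else if cv.1 > x1 ∧ cv.1 < x2 then temp ++ [cv.2]
      else temp ++ [0]) []

-- ===== PORT B =====
-- res = [0]*len(t); if t: res[0] = t[0]
def pvBase (t : List Int) : List Int :=
  match t with
  | [] => List.replicate t.length 0
  | v :: _ => (List.replicate t.length 0).set 0 v

def bandPass_Filter_alt (t : List Int) (x1 : Int) (x2 : Int) : List Int :=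
  let res := pvBase t
  let lo : Int := max 1 (x1 + 1)
  let hi : Int := min (t.length : Int) x2
  if lo < hi then
    res.take lo.toNat ++ PySem.List.slice t (some lo) (some hi) ++ res.drop hi.toNat
  else res

-- ===== PRECONDITION & SPEC =====
def Spec_bandPass_Filter (t : List Int) (x1 : Int) (x2 : Int) (out : List Int) : Prop := out = bandPass_Filter_alt t x1 x2
instance (t : List Int) (x1 : Int) (x2 : Int) (out : List Int) : Decidable (Spec_bandPass_Filter t x1 x2 out) := by unfold Spec_bandPass_Filter; infer_instance

-- ===== CLAIM (what is proved, stated in full; the proofs are below) =====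
def Claim_equal_bandPass_Filter : Prop := ∀ (t : List Int) (x1 : Int) (x2 : Int), Dom_bandPass_Filter t x1 x2 → Spec_bandPass_Filter t x1 x2 (bandPass_Filter t x1 x2)

-- ===== LEMMAS AND PROOFS =====

-- the kept/zeroed value at index i, as a pure function of the index — both ports are shown
-- elementwise equal to it
def pvKeep (x1 x2 : Int) (i : Nat) (v : Int) : Int :=
  if i = 0 then v else if x1 < (i : Int) ∧ (i : Int) < x2 then v else 0

lemma A_eq_map (t : List Int) (x1 x2 : Int) :
    bandPass_Filter t x1 x2 =
      (PySem.List.enumerate t 0).map (fun cv => pvKeep x1 x2 cv.1.toNat cv.2) := by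
  unfold bandPass_Filter
  rw [PySem.List.foldl_congr_mem' (g := fun temp cv => temp ++ [pvKeep x1 x2 cv.1.toNat cv.2])]
  · exact PySem.List.foldl_append_singleton_eq_map ..
  · intro cv hmem acc
    rcases (PySem.List.mem_enumerate_iff _ _ _).1 hmem with ⟨k, hk, rfl⟩
    have h1 : ((0:ℤ) + (k:ℤ)) = (k:ℤ) := by omega
    simp only [h1, Int.toNat_natCast, pvKeep]
    by_cases h0 : k = 0
    · simp [h0]
    · have h0' : ¬((k:Int) = 0) := by omega
      simp only [h0, h0', gt_iff_lt, if_false]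
      split_ifs <;> rfl

lemma A_length (t : List Int) (x1 x2 : Int) :
    (bandPass_Filter t x1 x2).length = t.length := by
  simp [A_eq_map, PySem.List.length_enumerate]

lemma A_getElem (t : List Int) (x1 x2 : Int) (i : Nat) (h : i < t.length) :
    (bandPass_Filter t x1 x2)[i]'(by simpa [A_length] using h) = pvKeep x1 x2 i t[i] := by
  rw [List.getElem_of_eq (A_eq_map t x1 x2)]
  rw [List.getElem_map, PySem.List.getElem_enumerate]
  have h1 : ((0:ℤ) + (i:ℤ)) = (i:ℤ) := by omega
  simp only [h1, Int.toNat_natCast]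

lemma pvBase_length (t : List Int) : (pvBase t).length = t.length := by
  cases t <;> simp [pvBase]

lemma pvBase_getElem (t : List Int) (i : Nat) (h : i < t.length) :
    (pvBase t)[i]'(by simpa [pvBase_length] using h) =
      if i = 0 then t[0]'(by omega) else 0 := by
  cases t with
  | nil => simp at h
  | cons v ts =>
    by_cases h0 : i = 0
    · simp [pvBase, h0]
    · have h0' : (0:Nat) ≠ i := fun e => h0 e.symm
      simp [pvBase, h0, h0']

lemma alt_def (t : List Int) (x1 x2 : Int) :
    bandPass_Filter_alt t x1 x2 =
      if max 1 (x1 + 1) < min (t.length : Int) x2 then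
        (pvBase t).take (max 1 (x1 + 1)).toNat ++
          PySem.List.slice t (some (max 1 (x1 + 1))) (some (min (t.length : Int) x2)) ++
          (pvBase t).drop (min (t.length : Int) x2).toNat
      else pvBase t := rfl

lemma B_length (t : List Int) (x1 x2 : Int) :
    (bandPass_Filter_alt t x1 x2).length = t.length := by
  rw [alt_def]
  have h1 : (1:Int) ≤ max 1 (x1+1) := le_max_left _ _
  have h2 : min (t.length : Int) x2 ≤ t.length := min_le_left _ _
  split
  · rename_i hlt
    rw [PySem.List.slice_toNat (a := max 1 (x1+1)) (b := min (t.length:Int) x2) t (by omega) (by omega)]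
    simp [pvBase_length]
    omega
  · exact pvBase_length t

lemma B_getElem (t : List Int) (x1 x2 : Int) (i : Nat) (h : i < t.length) :
    (bandPass_Filter_alt t x1 x2)[i]'(by simpa [B_length] using h) = pvKeep x1 x2 i t[i] := by
  have h1 : (1:Int) ≤ max 1 (x1+1) := le_max_left _ _
  have h2 : min (t.length : Int) x2 ≤ t.length := min_le_left _ _
  have hx1 : x1 + 1 ≤ max 1 (x1+1) := le_max_right _ _
  have hx1' : max 1 (x1+1) = 1 ∨ max 1 (x1+1) = x1 + 1 := max_choice _ _
  have hx2 : min (t.length : Int) x2 ≤ x2 := min_le_right _ _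
  have hx2' : min (t.length : Int) x2 = (t.length:Int) ∨ min (t.length : Int) x2 = x2 := min_choice _ _
  rw [List.getElem_of_eq (alt_def t x1 x2)]
  split
  · rename_i hlt
    have hHint : ((min (t.length:Int) x2).toNat : Int) = min (t.length:Int) x2 := Int.toNat_of_nonneg (by omega)
    have hLint : ((max 1 (x1+1)).toNat : Int) = max 1 (x1+1) := Int.toNat_of_nonneg (by omega)
    have hcmp : 1 ≤ (max 1 (x1+1)).toNat ∧ (max 1 (x1+1)).toNat < (min (t.length:Int) x2).toNat ∧ (min (t.length:Int) x2).toNat ≤ t.length := by omega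
    have hslice := PySem.List.slice_toNat (a := max 1 (x1+1)) (b := min (t.length:Int) x2) t (by omega) (by omega)
    simp only [hslice]
    rw [List.getElem_append]
    split
    · rename_i hin
      rw [List.getElem_append]
      split
      · rename_i hin2
        have hiL : i < (max 1 (x1+1)).toNat := by
          simp only [List.length_take, pvBase_length] at hin2; omega
        rw [List.getElem_take, pvBase_getElem t i h]
        simp only [pvKeep]
        by_cases h0 : i = 0
        · simp [h0]
        · have hnb : ¬ (x1 < (i:Int) ∧ (i:Int) < x2) := by omega
          simp [h0, hnb]
      · rename_i hin2
        have hmid : (max 1 (x1+1)).toNat ≤ i ∧ i < (min (t.length:Int) x2).toNat := by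
          simp only [List.length_take, List.length_append, List.length_drop, pvBase_length] at hin hin2
          omega
        rw [List.getElem_take, List.getElem_drop]
        simp only [List.length_take, pvBase_length]
        have hidx : (max 1 (x1+1)).toNat + (i - min (max 1 (x1+1)).toNat t.length) = i := by omega
        simp only [hidx, pvKeep]
        have h0 : ¬ i = 0 := by omega
        have hband : x1 < (i:Int) ∧ (i:Int) < x2 := by omega
        simp [h0, hband]
    · rename_i hin
      have hHi : (min (t.length:Int) x2).toNat ≤ i := by
        simp only [List.length_take, List.length_append, List.length_drop, pvBase_length] at hin
        omega
      rw [List.getElem_drop]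
      simp only [List.length_append, List.length_take, List.length_drop, pvBase_length]
      have hidx : (min (t.length:Int) x2).toNat + (i - (min (max 1 (x1+1)).toNat t.length + min ((min (t.length:Int) x2).toNat - (max 1 (x1+1)).toNat) (t.length - (max 1 (x1+1)).toNat))) = i := by omega
      simp only [hidx]
      rw [pvBase_getElem t i h]
      simp only [pvKeep]
      have h0 : ¬ i = 0 := by omega
      have hnb : ¬ (x1 < (i:Int) ∧ (i:Int) < x2) := by omega
      simp [h0, hnb]
  · rename_i hge
    rw [pvBase_getElem t i h]
    simp only [pvKeep]
    by_cases h0 : i = 0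
    · simp [h0]
    · have hnb : ¬ (x1 < (i:Int) ∧ (i:Int) < x2) := by
        intro ⟨ha, hb⟩
        exact hge (by omega)
      simp [h0, hnb]

-- ===== VERDICT (by name: the statement is the Claim_ definition above) =====
theorem bandPass_Filter_spec : Claim_equal_bandPass_Filter := by
  intro t x1 x2 _
  unfold Spec_bandPass_Filter
  apply List.ext_getElem
  · rw [A_length, B_length]
  · intro i h1 h2
    rw [A_getElem t x1 x2 i (by simpa [A_length] using h1),
        B_getElem t x1 x2 i (by simpa [A_length] using h1)]
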